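-- pv_equiv track=rewrite | github.com/div-aigen/RAG_based_extraction | chunking.py | sentence_chunking
-- ===== SOURCE A (Python) =====
-- def sentence_chunking(text: str, max_tokens: int):
--     # Split into sentences first (handling common sentence endings)
--     sentences = []
--     current_sentence = []
--
--     # Split into words but preserve punctuation
--     words = text.split()
--
--     for word in words:
--         current_sentence.append(word)
--         # Check for sentence endings (.!?)
--         if word.endswith(('.', '!', '?')):
--             sentences.append(' '.join(current_sentence))
--             current_sentence = []
--
--     # Handle any remaining text as a sentence
--     if current_sentence:
--         sentences.append(' '.join(current_sentence))
--
--     # Now create chunks from complete sentences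
--     chunks = []
--     current_chunk = []
--     current_tokens = 0
--
--     for sentence in sentences:
--         sentence_tokens = len(sentence.split())
--
--         # If adding this sentence would exceed max_tokens
--         if current_tokens + sentence_tokens > max_tokens:
--             if current_chunk:  # Save current chunk if it exists
--                 chunks.append(' '.join(current_chunk))
--             current_chunk = [sentence]
--             current_tokens = sentence_tokens
--         else:
--             current_chunk.append(sentence)
--             current_tokens += sentence_tokens
--
--     # Add the final chunk
--     if current_chunk:
--         chunks.append(' '.join(current_chunk))
--
--     return chunks
-- ===== SOURCE B (Python) =====
-- def sentence_chunking(text: str, max_tokens: int):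
--     # Index-arithmetic approach: compute sentence-end cut positions over the word
--     # array, then emit chunks as maximal cut runs, slicing words directly; no
--     # sentence strings, no running chunk/token accumulators.
--     words = text.split()
--     cuts = [i + 1 for i, w in enumerate(words) if w[-1] in '.!?']
--     if words and words[-1][-1] not in '.!?':
--         cuts.append(len(words))
--
--     chunks = []
--     start = 0
--     k = 0
--     while k < len(cuts):
--         end = cuts[k]
--         k += 1
--         # a chunk spans whole sentences; its token count is end - start
--         while k < len(cuts) and cuts[k] - start <= max_tokens:
--             end = cuts[k]
--             k += 1
--         chunks.append(' '.join(words[start:end]))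
--         start = end
--     return chunks
-- ===== Notes on version B (the rewrite author's own statement) =====
-- stated objective: alternative
-- what changed: B replaces A's string-accumulator state machine by index arithmetic: it computes the sentence-end cut positions over the word array, emits each chunk as a maximal run of cuts whose span (end - start) stays within max_tokens, and slices the chunk's words directly out of the array - no sentence strings, no running chunk list or token counter.
import Mathlib
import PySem

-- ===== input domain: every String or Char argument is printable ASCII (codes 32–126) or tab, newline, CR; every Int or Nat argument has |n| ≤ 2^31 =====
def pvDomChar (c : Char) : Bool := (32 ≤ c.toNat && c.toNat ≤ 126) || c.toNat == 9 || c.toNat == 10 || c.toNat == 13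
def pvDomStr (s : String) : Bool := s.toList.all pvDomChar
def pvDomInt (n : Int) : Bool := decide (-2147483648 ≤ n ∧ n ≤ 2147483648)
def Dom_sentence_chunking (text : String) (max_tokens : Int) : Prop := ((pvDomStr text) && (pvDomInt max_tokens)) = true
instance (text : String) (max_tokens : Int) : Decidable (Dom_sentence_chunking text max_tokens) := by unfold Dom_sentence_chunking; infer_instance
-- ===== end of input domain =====

-- B replaces A's string-accumulator state machine by index arithmetic over the word array:
-- sentence-end cut positions, chunks as maximal cut runs with span end - start ≤ max_tokens,
-- chunk text sliced directly out of the word array; same return value.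


-- ===== PORT A =====
-- body of A's first loop (sentence building)
def aPass1Step (st : List String × List String) (word : String) : List String × List String :=
  let cur := st.2 ++ [word]
  if PySem.Str.endswith word "." || PySem.Str.endswith word "!" || PySem.Str.endswith word "?" then
    (st.1 ++ [PySem.Str.join " " cur], [])
  else
    (st.1, cur)

-- body of A's second loop (greedy packing; state = (chunks, current_chunk, current_tokens))
def aPackStep (max_tokens : Int) (st : List String × List String × Int) (sentence : String) :
    List String × List String × Int :=
  let sentence_tokens : Int := ((PySem.Str.split₀ sentence).length : Int)
  if st.2.2 + sentence_tokens > max_tokens then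
    ((if st.2.1 = [] then st.1 else st.1 ++ [PySem.Str.join " " st.2.1]), [sentence], sentence_tokens)
  else
    (st.1, st.2.1 ++ [sentence], st.2.2 + sentence_tokens)

def sentence_chunking (text : String) (max_tokens : Int) : List String :=
  let words := PySem.Str.split₀ text
  let p1 := words.foldl aPass1Step ([], [])
  let sentences := if p1.2 = [] then p1.1 else p1.1 ++ [PySem.Str.join " " p1.2]
  let p2 := sentences.foldl (aPackStep max_tokens) ([], [], 0)
  if p2.2.1 = [] then p2.1 else p2.1 ++ [PySem.Str.join " " p2.2.1]

-- ===== PORT B =====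
-- w[-1] in '.!?'   (words produced by text.split() are nonempty, so w[-1] never raises)
def bEnds (w : String) : Bool :=
  match PySem.Str.pyGet? w (-1) with
  | some c => ['.', '!', '?'].contains c
  | none => false

-- inner while: advance over cuts while the span cuts[k] - start stays ≤ max_tokens
def bInner (m start : Int) : Int → List Int → Int × List Int
  | e, [] => (e, [])
  | e, c :: r => if c - start ≤ m then bInner m start c r else (e, c :: r)

-- needed by bOuter's decreasing_by: the inner while only consumes cuts
theorem bInner_rest_le (m start : Int) : ∀ (e : Int) (cs : List Int),
    (bInner m start e cs).2.length ≤ cs.length := by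
  intro e cs
  induction cs generalizing e with
  | nil => simp [bInner]
  | cons c r ih =>
      simp only [bInner]
      split
      · exact le_trans (ih c) (by simp)
      · simp

-- outer while over the cut list (the index k is represented by the remaining suffix of cuts)
def bOuter (words : List String) (m : Int) : Int → List Int → List String
  | _, [] => []
  | start, c :: r =>
      let p := bInner m start c r
      PySem.Str.join " " (PySem.List.slice words (some start) (some p.1)) :: bOuter words m p.1 p.2
termination_by _ cs => cs.length
decreasing_by
  simpa using Nat.lt_succ_of_le (bInner_rest_le m start c r)

def sentence_chunking_alt (text : String) (max_tokens : Int) : List String :=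
  let words := PySem.Str.split₀ text
  let cuts0 := (PySem.List.enumerate words 0).filterMap
    (fun p => if bEnds p.2 then some (p.1 + 1) else none)
  let cuts := match PySem.List.pyGet? words (-1) with   -- 'if words and words[-1][-1] not in ...'
    | some w => if bEnds w then cuts0 else cuts0 ++ [(words.length : Int)]
    | none => cuts0
  bOuter words max_tokens 0 cuts

-- ===== PRECONDITION & SPEC =====
def Spec_sentence_chunking (text : String) (max_tokens : Int) (out : List String) : Prop := out = sentence_chunking_alt text max_tokens
instance (text : String) (max_tokens : Int) (out : List String) : Decidable (Spec_sentence_chunking text max_tokens out) := by unfold Spec_sentence_chunking; infer_instance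

-- ===== CLAIM (what is proved, stated in full; the proofs are below) =====
def Claim_equal_sentence_chunking : Prop := ∀ (text : String) (max_tokens : Int), Dom_sentence_chunking text max_tokens → Spec_sentence_chunking text max_tokens (sentence_chunking text max_tokens)

-- ===== LEMMAS AND PROOFS =====

-- a "word": nonempty and free of Python whitespace (what text.split() produces)
def GoodS (w : String) : Prop := w.toList ≠ [] ∧ ∀ c ∈ w.toList, PySem.Chars.isspace c = false

def endsP (w : String) : Bool :=
  PySem.Str.endswith w "." || PySem.Str.endswith w "!" || PySem.Str.endswith w "?"

-- the sentence word groups of a word list (mirrors A's first loop, kept as word lists)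
def groupsW : List String → List String → List (List String)
  | [], cur => if cur = [] then [] else [cur]
  | w :: ws, cur => if endsP w then (cur ++ [w]) :: groupsW ws [] else groupsW ws (cur ++ [w])

-- cumulative sentence end positions
def cumEnds (s : Int) : List (List String) → List Int
  | [] => []
  | g :: gs => (s + (g.length : Int)) :: cumEnds (s + (g.length : Int)) gs

-- raw cut list: 1-based positions (offset n) of the sentence-terminating words
def rawCuts (n : Int) : List String → List Int
  | [] => []
  | w :: ws => if endsP w then (n + 1) :: rawCuts (n + 1) ws else rawCuts (n + 1) ws

-- the one extra trailing cut (present iff the last word does not end a sentence)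
def tailCut (n : Int) (l : List String) : List Int :=
  match l.getLast? with
  | none => []
  | some w => if endsP w then [] else [n]

-- greedy grab of following groups while the running token total stays ≤ m
def grab (m : Int) : Int → List (List String) → List (List String) × List (List String)
  | _, [] => ([], [])
  | t, g :: gs =>
      if t + (g.length : Int) ≤ m then
        let p := grab m (t + (g.length : Int)) gs
        (g :: p.1, p.2)
      else ([], g :: gs)

theorem grab_rest_le (m : Int) : ∀ (t : Int) (gs : List (List String)),
    (grab m t gs).2.length ≤ gs.length := by
  intro t gs
  induction gs generalizing t with
  | nil => simp [grab]
  | cons g gs ih =>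
      simp only [grab]
      split
      · exact le_trans (ih _) (by simp)
      · simp

theorem grab_append (m : Int) : ∀ (t : Int) (gs : List (List String)),
    (grab m t gs).1 ++ (grab m t gs).2 = gs := by
  intro t gs
  induction gs generalizing t with
  | nil => simp [grab]
  | cons g gs ih =>
      simp only [grab]
      split
      · simpa using ih (t + (g.length : Int))
      · simp

-- run-based chunking on groups (mirrors B's nested whiles)
def runG (m : Int) : List (List String) → List (List (List String))
  | [] => []
  | g :: gs =>
      let p := grab m (g.length : Int) gs
      (g :: p.1) :: runG m p.2
termination_by gs => gs.length
decreasing_by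
  simpa using Nat.lt_succ_of_le (grab_rest_le m (g.length : Int) gs)

-- fold-based chunking on groups (mirrors A's second loop)
def MStep (m : Int) (st : List (List String) × List (List String) × Int) (g : List String) :
    List (List String) × List (List String) × Int :=
  if st.2.2 + (g.length : Int) > m then
    ((if st.2.1 = [] then st.1 else st.1 ++ [st.2.1.flatten]), [g], (g.length : Int))
  else (st.1, st.2.1 ++ [g], st.2.2 + (g.length : Int))

def GoodG (g : List String) : Prop := g ≠ [] ∧ ∀ w ∈ g, GoodS w

-- ---------- split₀ facts ----------

lemma go_word (w : List Char) (h : ∀ c ∈ w, PySem.Chars.isspace c = false) :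
    ∀ (rest cur acc : _), PySem.Chars.split₀.go (w ++ rest) cur acc
      = PySem.Chars.split₀.go rest (w.reverse ++ cur) acc := by
  induction w with
  | nil => intro rest cur acc; simp
  | cons c w ih =>
      intro rest cur acc
      have hc : PySem.Chars.isspace c = false := h c (by simp)
      simp only [List.cons_append, PySem.Chars.split₀.go, hc, Bool.false_eq_true, if_false]
      rw [ih (fun d hd => h d (by simp [hd]))]
      simp

lemma go_join (css : List (List Char)) (h : ∀ w ∈ css, w ≠ [] ∧ ∀ c ∈ w, PySem.Chars.isspace c = false) :
    ∀ acc, PySem.Chars.split₀.go (PySem.Chars.join [' '] css) [] acc = acc.reverse ++ css := by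
  induction css with
  | nil => intro acc; simp [PySem.Chars.join_nil, PySem.Chars.split₀.go]
  | cons w css ih =>
      intro acc
      obtain ⟨hw, hns⟩ := h w (by simp)
      cases css with
      | nil =>
          rw [PySem.Chars.join_singleton]
          rw [show w = w ++ [] by simp, go_word w hns]
          simp [PySem.Chars.split₀.go, List.isEmpty_iff, hw]
      | cons w2 css2 =>
          rw [PySem.Chars.join_cons_cons, List.append_assoc, go_word w hns]
          have hsp : PySem.Chars.isspace ' ' = true := by decide
          simp only [List.cons_append, List.nil_append, PySem.Chars.split₀.go, hsp, if_true,
            List.isEmpty_iff, List.append_nil]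
          rw [if_neg (by simp [hw])]
          rw [ih (fun v hv => h v (by simp [hv])) _]
          simp

lemma go_good (s : List Char) : ∀ (cur acc : _),
    (∀ a ∈ acc, a ≠ [] ∧ ∀ c ∈ a, PySem.Chars.isspace c = false) →
    (∀ c ∈ cur, PySem.Chars.isspace c = false) →
    ∀ w ∈ PySem.Chars.split₀.go s cur acc, w ≠ [] ∧ ∀ c ∈ w, PySem.Chars.isspace c = false := by
  induction s with
  | nil =>
      intro cur acc hacc hcur w hw
      by_cases hc : cur = []
      · subst hc; simp [PySem.Chars.split₀.go] at hw; exact hacc w (by simpa using hw)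
      · simp [PySem.Chars.split₀.go, List.isEmpty_iff, hc] at hw
        rcases hw with hw | hw
        · exact hacc w (by simpa using hw)
        · subst hw; refine ⟨by simpa using hc, fun c hc' => hcur c (by simpa using hc')⟩
  | cons c s ih =>
      intro cur acc hacc hcur w hw
      by_cases hsp : PySem.Chars.isspace c = true
      · by_cases hc : cur = []
        · subst hc
          simp only [PySem.Chars.split₀.go, hsp, if_true, List.isEmpty_nil] at hw
          exact ih [] acc hacc (by simp) w (by simpa using hw)
        · simp only [PySem.Chars.split₀.go, hsp, if_true, List.isEmpty_iff, if_neg hc] at hw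
          refine ih [] (cur.reverse :: acc) ?_ (by simp) w hw
          intro a ha
          rcases List.mem_cons.mp ha with ha | ha
          · subst ha
            exact ⟨by simpa using hc, fun d hd => hcur d (by simpa using hd)⟩
          · exact hacc a ha
      · simp only [PySem.Chars.split₀.go, hsp, Bool.false_eq_true, if_false] at hw
        refine ih (c :: cur) acc hacc ?_ w hw
        intro d hd
        rcases List.mem_cons.mp hd with hd | hd
        · subst hd; simpa using hsp
        · exact hcur d hd

lemma split₀_good (text : String) : ∀ w ∈ PySem.Str.split₀ text, GoodS w := by
  intro w hw
  simp only [PySem.Str.split₀, List.mem_map] at hw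
  obtain ⟨v, hv, rfl⟩ := hw
  have := go_good text.toList [] [] (by simp) (by simp) v hv
  exact ⟨by simpa [String.toList_ofList] using this.1,
         by simpa [String.toList_ofList] using this.2⟩

lemma split_join (ws : List String) (h : ∀ w ∈ ws, GoodS w) :
    PySem.Str.split₀ (PySem.Str.join " " ws) = ws := by
  unfold PySem.Str.split₀
  rw [PySem.Str.toList_join]
  have : (" " : String).toList = [' '] := by decide
  rw [this, show PySem.Chars.split₀ (PySem.Chars.join [' '] (ws.map String.toList))
        = PySem.Chars.split₀.go (PySem.Chars.join [' '] (ws.map String.toList)) [] [] from rfl]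
  rw [go_join (ws.map String.toList) ?_ []]
  · simp [List.map_map, Function.comp_def, String.ofList_toList]
  · intro v hv
    obtain ⟨w, hw, rfl⟩ := List.mem_map.mp hv
    exact (h w hw).imp id id

-- on a nonempty word both ports test the same sentence-ending condition
lemma last_char (w : String) (hw : w.toList ≠ []) :
    ∃ d, PySem.Str.pyGet? w (-1) = some d ∧ endsP w = (['.', '!', '?'].contains d) := by
  obtain ⟨v, d, hvd⟩ : ∃ v d, w.toList = v ++ [d] := by
    induction hl : w.toList using List.reverseRecOn with
    | nil => exact absurd hl hw
    | append_singleton v d _ => exact ⟨v, d, rfl⟩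
  refine ⟨d, ?_, ?_⟩
  · show PySem.Chars.pyGet? w.toList (-1) = some d
    rw [hvd]
    simp [PySem.Chars.pyGet?, PySem.List.pyGet?, PySem.List.pyIdx?]
  · have h1 : ∀ c : Char, PySem.Chars.endswith w.toList [c] = (d == c) := by
      intro c
      rw [hvd, PySem.Chars.endswith, List.isSuffixOf]
      simp [List.isPrefixOf, BEq.comm]
    have e1 : PySem.Str.endswith w "." = PySem.Chars.endswith w.toList ['.'] := rfl
    have e2 : PySem.Str.endswith w "!" = PySem.Chars.endswith w.toList ['!'] := rfl
    have e3 : PySem.Str.endswith w "?" = PySem.Chars.endswith w.toList ['?'] := rfl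
    rw [endsP, e1, e2, e3, h1, h1, h1]
    simp only [List.contains_cons, List.contains_nil, Bool.or_false, Bool.or_assoc]

lemma bEnds_eq (w : String) (h : GoodS w) : bEnds w = endsP w := by
  obtain ⟨d, hd, he⟩ := last_char w h.1
  rw [bEnds, hd, he]

-- ---------- join lemmas ----------

lemma join_append_chars (sep : List Char) : ∀ (xs ys : List (List Char)), xs ≠ [] → ys ≠ [] →
    PySem.Chars.join sep (xs ++ ys) = PySem.Chars.join sep xs ++ sep ++ PySem.Chars.join sep ys := by
  intro xs
  induction xs with
  | nil => intro ys h _; exact absurd rfl h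
  | cons x xs ih =>
      intro ys _ hys
      cases xs with
      | nil =>
          cases ys with
          | nil => exact absurd rfl hys
          | cons y ys' => rw [PySem.Chars.join_singleton]; simp [PySem.Chars.join_cons_cons]
      | cons x2 xs' =>
          have hx := ih ys (by simp) hys
          simp only [List.cons_append] at hx ⊢
          rw [PySem.Chars.join_cons_cons, PySem.Chars.join_cons_cons, hx]
          simp [List.append_assoc]

lemma join_flatten_chars : ∀ (css : List (List (List Char))), (∀ cs ∈ css, cs ≠ []) →
    PySem.Chars.join [' '] (css.map (PySem.Chars.join [' '])) = PySem.Chars.join [' '] css.flatten := by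
  intro css
  induction css with
  | nil => intro _; simp
  | cons cs css ih =>
      intro h
      cases css with
      | nil => simp [PySem.Chars.join_singleton]
      | cons cs2 css2 =>
          rw [List.map_cons, List.map_cons, PySem.Chars.join_cons_cons, ← List.map_cons,
              ih (fun v hv => h v (by simp [hv]))]
          conv_rhs => rw [List.flatten_cons, join_append_chars [' '] cs ((cs2 :: css2).flatten)
              (h cs (by simp)) (by simp [h cs2 (by simp)])]

lemma join_map_join (gs : List (List String)) (h : ∀ g ∈ gs, g ≠ []) :
    PySem.Str.join " " (gs.map (PySem.Str.join " ")) = PySem.Str.join " " gs.flatten := by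
  have hsep : (" " : String).toList = [' '] := by decide
  have hchars : (PySem.Str.join " " (gs.map (PySem.Str.join " "))).toList
      = (PySem.Str.join " " gs.flatten).toList := by
    rw [PySem.Str.toList_join, PySem.Str.toList_join, hsep]
    have hmm : (gs.map (PySem.Str.join " ")).map String.toList
        = (gs.map (List.map String.toList)).map (PySem.Chars.join [' ']) := by
      simp only [List.map_map]
      refine List.map_congr_left ?_
      intro g _
      simp [Function.comp, PySem.Str.toList_join, hsep]
    rw [hmm, join_flatten_chars (gs.map (List.map String.toList))
          (by intro cs hcs; obtain ⟨g, hg, rfl⟩ := List.mem_map.mp hcs; simp [h g hg]),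
        ← List.map_flatten]
  have h2 := congrArg String.ofList hchars
  rwa [String.ofList_toList, String.ofList_toList] at h2

-- ---------- A's first pass builds exactly the word groups ----------

lemma aPass1Step_eq (st : List String × List String) (w : String) :
    aPass1Step st w
      = if endsP w then (st.1 ++ [PySem.Str.join " " (st.2 ++ [w])], []) else (st.1, st.2 ++ [w]) := rfl

lemma pass1_groups : ∀ (ws S cur : List String),
    (if (List.foldl aPass1Step (S, cur) ws).2 = [] then (List.foldl aPass1Step (S, cur) ws).1
     else (List.foldl aPass1Step (S, cur) ws).1
          ++ [PySem.Str.join " " (List.foldl aPass1Step (S, cur) ws).2])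
    = S ++ (groupsW ws cur).map (PySem.Str.join " ") := by
  intro ws
  induction ws with
  | nil =>
      intro S cur
      by_cases hc : cur = [] <;> simp [groupsW, hc]
  | cons w ws ih =>
      intro S cur
      simp only [List.foldl_cons, aPass1Step_eq]
      cases hw : endsP w with
      | true =>
          simp only [if_true, groupsW, hw]
          rw [ih (S ++ [PySem.Str.join " " (cur ++ [w])]) []]
          simp
      | false =>
          simp only [Bool.false_eq_true, if_false, groupsW, hw]
          exact ih S (cur ++ [w])

lemma groups_flatten : ∀ (ws cur : List String), (groupsW ws cur).flatten = cur ++ ws := by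
  intro ws
  induction ws with
  | nil => intro cur; by_cases hc : cur = [] <;> simp [groupsW, hc]
  | cons w ws ih =>
      intro cur
      cases hw : endsP w with
      | true => simp [groupsW, hw, ih]
      | false => simp [groupsW, hw, ih]

lemma groups_ne : ∀ (ws cur : List String), ∀ g ∈ groupsW ws cur, g ≠ [] := by
  intro ws
  induction ws with
  | nil =>
      intro cur g hg
      by_cases hc : cur = []
      · simp [groupsW, hc] at hg
      · simp [groupsW, hc] at hg; simp [hg, hc]
  | cons w ws ih =>
      intro cur g hg
      cases hw : endsP w with
      | true =>
          simp only [groupsW, hw, if_true, List.mem_cons] at hg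
          rcases hg with hg | hg
          · simp [hg]
          · exact ih [] g hg
      | false =>
          simp only [groupsW, hw, Bool.false_eq_true, if_false] at hg
          exact ih (cur ++ [w]) g hg

-- ---------- B's cut list = cumulative group ends ----------

lemma enum_cuts : ∀ (ws : List String) (n : Int), (∀ w ∈ ws, GoodS w) →
    (PySem.List.enumerate ws n).filterMap (fun p => if bEnds p.2 then some (p.1 + 1) else none)
    = rawCuts n ws := by
  intro ws
  induction ws with
  | nil => intro n _; simp [PySem.List.enumerate_nil, rawCuts]
  | cons w ws ih =>
      intro n h
      rw [PySem.List.enumerate_cons, List.filterMap_cons]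
      have hb : bEnds w = endsP w := bEnds_eq w (h w (by simp))
      cases hw : endsP w with
      | true => simp only [hb, hw, if_true, rawCuts, ih (n+1) (fun v hv => h v (by simp [hv]))]
      | false =>
          simp only [hb, hw, Bool.false_eq_true, if_false, rawCuts,
            ih (n+1) (fun v hv => h v (by simp [hv]))]

lemma cuts_groups : ∀ (ws : List String) (n : Int) (cur : List String),
    (∀ w, cur.getLast? = some w → endsP w = false) →
    cumEnds (n - (cur.length : Int)) (groupsW ws cur)
      = rawCuts n ws ++ tailCut (n + (ws.length : Int)) (cur ++ ws) := by
  intro ws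
  induction ws with
  | nil =>
      intro n cur hcur
      by_cases hc : cur = []
      · subst hc; simp [groupsW, cumEnds, rawCuts, tailCut]
      · obtain ⟨w, hw⟩ := Option.isSome_iff_exists.mp (List.getLast?_isSome.mpr hc)
        simp only [groupsW, hc, if_false, cumEnds, rawCuts, List.append_nil, tailCut, hw,
          hcur w hw, Bool.false_eq_true, if_false]
        simp only [List.nil_append, List.length_nil, Nat.cast_zero, add_zero]
        congr 1
        omega
  | cons w ws ih =>
      intro n cur hcur
      cases hw : endsP w with
      | true =>
          simp only [groupsW, hw, if_true, cumEnds]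
          have e1 : n - (cur.length : Int) + ((cur ++ [w]).length : Int) = n + 1 := by
            simp only [List.length_append, List.length_cons, List.length_nil]
            push_cast
            omega
          rw [e1]
          have hih := ih (n + 1) [] (by intro v hv; simp at hv)
          simp only [List.length_nil, Nat.cast_zero, sub_zero, List.nil_append] at hih
          rw [hih]
          have htail : tailCut (n + 1 + (ws.length : Int)) ws
              = tailCut (n + ((w :: ws).length : Int)) (cur ++ w :: ws) := by
            cases hws : ws with
            | nil =>
                have hl : (cur ++ w :: ([] : List String)).getLast? = some w := by
                  simp
                simp [tailCut, hl, hw]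
            | cons y ys =>
                have hl : (cur ++ w :: y :: ys).getLast? = (y :: ys).getLast? := by
                  rw [List.getLast?_append_of_ne_nil cur (by simp), List.getLast?_cons_cons]
                have e2 : n + 1 + ((y :: ys).length : Int) = n + ((w :: y :: ys).length : Int) := by
                  simp only [List.length_cons]; push_cast; omega
                simp only [tailCut, hl, e2]
          rw [htail]
          simp [rawCuts, hw]
      | false =>
          simp only [groupsW, hw, Bool.false_eq_true, if_false]
          have h1 : n - (cur.length : Int) = (n + 1) - (((cur ++ [w]).length : Int)) := by
            simp only [List.length_append, List.length_cons, List.length_nil]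
            push_cast
            omega
          rw [h1, ih (n + 1) (cur ++ [w])
                (by intro v hv; rw [List.getLast?_concat] at hv; cases hv; exact hw)]
          have e3 : n + 1 + (ws.length : Int) = n + ((w :: ws).length : Int) := by
            simp only [List.length_cons]; push_cast; omega
          rw [List.append_assoc, e3]
          simp [rawCuts, hw]

-- ---------- B's whiles over cuts = grab/run recursion on groups ----------

lemma inner_grab (m : Int) : ∀ (gs : List (List String)) (s t : Int),
    bInner m s (s + t) (cumEnds (s + t) gs)
      = (s + t + ((grab m t gs).1.flatten.length : Int),
         cumEnds (s + t + ((grab m t gs).1.flatten.length : Int)) (grab m t gs).2) := by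
  intro gs
  induction gs with
  | nil => intro s t; simp [bInner, cumEnds, grab]
  | cons g gs ih =>
      intro s t
      simp only [cumEnds, bInner, grab]
      by_cases h : t + (g.length : Int) ≤ m
      · rw [if_pos (by omega : s + t + (g.length : Int) - s ≤ m), if_pos h]
        have hih := ih s (t + (g.length : Int))
        rw [show s + (t + (g.length : Int)) = s + t + (g.length : Int) by ring] at hih
        rw [hih]
        have he : s + t + (g.length : Int) + ((grab m (t + (g.length : Int)) gs).1.flatten.length : Int)
            = s + t + (((g :: (grab m (t + (g.length : Int)) gs).1).flatten.length : Nat) : Int) := by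
          simp only [List.flatten_cons, List.length_append]
          push_cast
          ring
        rw [he]
      · rw [if_neg (by omega : ¬ (s + t + (g.length : Int) - s ≤ m)), if_neg h]
        simp [cumEnds]

lemma outer_run (m : Int) : ∀ (n : Nat) (gs : List (List String)) (pre : List String),
    gs.length ≤ n →
    bOuter (pre ++ gs.flatten) m ((pre.length : Nat) : Int) (cumEnds ((pre.length : Nat) : Int) gs)
      = (runG m gs).map (fun c => PySem.Str.join " " c.flatten) := by
  intro n
  induction n with
  | zero =>
      intro gs pre h
      have hg : gs = [] := List.length_eq_zero_iff.mp (Nat.le_zero.mp h)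
      subst hg
      simp [cumEnds, bOuter, runG]
  | succ n ih =>
      intro gs pre h
      cases gs with
      | nil => simp [cumEnds, bOuter, runG]
      | cons g gs' =>
          simp only [cumEnds, bOuter, runG]
          rw [inner_grab m gs' ((pre.length : Nat) : Int) ((g.length : Nat) : Int)]
          dsimp only
          have hga := grab_append m ((g.length : Nat) : Int) gs'
          have hwords : pre ++ (g :: gs').flatten
              = (pre ++ (g :: (grab m ((g.length : Nat) : Int) gs').1).flatten)
                ++ (grab m ((g.length : Nat) : Int) gs').2.flatten := by
            conv_lhs => rw [show (g :: gs') = g :: ((grab m ((g.length : Nat) : Int) gs').1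
                ++ (grab m ((g.length : Nat) : Int) gs').2) from by rw [hga]]
            simp [List.flatten_cons, List.flatten_append, List.append_assoc]
          have hidx : ((pre.length : Nat) : Int) + (g.length : Int)
                + ((grab m ((g.length : Nat) : Int) gs').1.flatten.length : Int)
              = ((pre.length : Nat) : Int)
                + (((g :: (grab m ((g.length : Nat) : Int) gs').1).flatten.length : Nat) : Int) := by
            simp only [List.flatten_cons, List.length_append]
            push_cast
            ring
          have hslice : PySem.List.slice (pre ++ (g :: gs').flatten)
                (some ((pre.length : Nat) : Int))
                (some (((pre.length : Nat) : Int) + (g.length : Int)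
                  + ((grab m ((g.length : Nat) : Int) gs').1.flatten.length : Int)))
              = (g :: (grab m ((g.length : Nat) : Int) gs').1).flatten := by
            rw [hidx, hwords, List.append_assoc, PySem.List.slice_natCast_add, List.drop_left,
                List.take_left]
          rw [hslice]
          have hpre' : ((pre.length : Nat) : Int) + (g.length : Int)
                + ((grab m ((g.length : Nat) : Int) gs').1.flatten.length : Int)
              = (((pre ++ (g :: (grab m ((g.length : Nat) : Int) gs').1).flatten).length : Nat) : Int) := by
            simp only [List.length_append, List.flatten_cons]
            push_cast
            ring
          have hlen : (grab m ((g.length : Nat) : Int) gs').2.length ≤ n :=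
            le_trans (grab_rest_le m _ gs') (Nat.lt_succ_iff.mp (Nat.lt_of_lt_of_le (by simp) h))
          rw [show pre ++ (g :: gs').flatten
              = (pre ++ (g :: (grab m ((g.length : Nat) : Int) gs').1).flatten)
                ++ (grab m ((g.length : Nat) : Int) gs').2.flatten from hwords, hpre',
              ih (grab m ((g.length : Nat) : Int) gs').2 _ hlen]
          simp

-- ---------- A's pack fold = grab/run recursion on groups ----------

lemma fold_run (m : Int) : ∀ (gs : List (List String)) (CH cur : List (List String)) (t : Int),
    cur ≠ [] →
    (if (List.foldl (MStep m) (CH, cur, t) gs).2.1 = [] then (List.foldl (MStep m) (CH, cur, t) gs).1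
     else (List.foldl (MStep m) (CH, cur, t) gs).1
          ++ [(List.foldl (MStep m) (CH, cur, t) gs).2.1.flatten])
    = CH ++ (cur ++ (grab m t gs).1).flatten :: (runG m (grab m t gs).2).map List.flatten := by
  intro gs
  induction gs with
  | nil =>
      intro CH cur t hcur
      simp [hcur, grab, runG]
  | cons g gs ih =>
      intro CH cur t hcur
      simp only [List.foldl_cons]
      by_cases h : t + (g.length : Int) ≤ m
      · have hst : MStep m (CH, cur, t) g = (CH, cur ++ [g], t + (g.length : Int)) := by
          simp only [MStep]
          rw [if_neg (show ¬ (t + (g.length : Int) > m) by omega)]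
        rw [hst, ih CH (cur ++ [g]) (t + (g.length : Int)) (by simp)]
        have hgr : grab m t (g :: gs)
            = (g :: (grab m (t + (g.length : Int)) gs).1, (grab m (t + (g.length : Int)) gs).2) := by
          simp only [grab, if_pos h]
        rw [hgr]
        simp [List.append_assoc]
      · have hst : MStep m (CH, cur, t) g = (CH ++ [cur.flatten], [g], (g.length : Int)) := by
          simp only [MStep]
          rw [if_pos (show t + (g.length : Int) > m by omega), if_neg hcur]
        rw [hst, ih (CH ++ [cur.flatten]) [g] ((g.length : Int)) (by simp)]
        have hgr : grab m t (g :: gs) = ([], g :: gs) := by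
          simp only [grab, if_neg h]
        rw [hgr]
        simp only [runG]
        simp [List.append_assoc]

lemma MRes_run (m : Int) (gs : List (List String)) :
    (if (List.foldl (MStep m) ([], [], 0) gs).2.1 = [] then (List.foldl (MStep m) ([], [], 0) gs).1
     else (List.foldl (MStep m) ([], [], 0) gs).1
          ++ [(List.foldl (MStep m) ([], [], 0) gs).2.1.flatten])
    = (runG m gs).map List.flatten := by
  cases gs with
  | nil => simp [runG]
  | cons g gs =>
      have h0 : MStep m ([], [], 0) g = ([], [g], (g.length : Int)) := by
        unfold MStep
        split <;> simp
      rw [List.foldl_cons, h0, fold_run m gs [] [g] ((g.length : Int)) (by simp)]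
      simp only [runG]
      simp

-- ---------- A's pack fold simulates the group-level fold ----------

lemma M_cur_good (m : Int) : ∀ (gs : List (List String)) (MC Mcur : List (List String)) (t : Int),
    (∀ g ∈ gs, GoodG g) → (∀ g ∈ Mcur, GoodG g) →
    ∀ g ∈ (List.foldl (MStep m) (MC, Mcur, t) gs).2.1, GoodG g := by
  intro gs
  induction gs with
  | nil => intro MC Mcur t _ hcur; simpa using hcur
  | cons g gs ih =>
      intro MC Mcur t hgs hcur
      have hg : GoodG g := hgs g (by simp)
      have hgs' : ∀ v ∈ gs, GoodG v := fun v hv => hgs v (by simp [hv])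
      simp only [List.foldl_cons]
      by_cases h : t + (g.length : Int) > m
      · have hst : MStep m (MC, Mcur, t) g
            = ((if Mcur = [] then MC else MC ++ [Mcur.flatten]), [g], (g.length : Int)) := by
          unfold MStep
          rw [if_pos h]
        rw [hst]
        exact ih _ [g] _ hgs' (by intro v hv; simp at hv; subst hv; exact hg)
      · have hst : MStep m (MC, Mcur, t) g = (MC, Mcur ++ [g], t + (g.length : Int)) := by
          unfold MStep
          rw [if_neg h]
        rw [hst]
        refine ih _ (Mcur ++ [g]) _ hgs' ?_
        intro v hv
        rcases List.mem_append.mp hv with hv | hv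
        · exact hcur v hv
        · rw [List.mem_singleton.mp hv]; exact hg

lemma packA (m : Int) : ∀ (gs : List (List String)) (MC Mcur : List (List String)) (t : Int),
    (∀ g ∈ gs, GoodG g) → (∀ g ∈ Mcur, GoodG g) →
    List.foldl (aPackStep m)
        (MC.map (PySem.Str.join " "), Mcur.map (PySem.Str.join " "), t)
        (gs.map (PySem.Str.join " "))
      = ((List.foldl (MStep m) (MC, Mcur, t) gs).1.map (PySem.Str.join " "),
         (List.foldl (MStep m) (MC, Mcur, t) gs).2.1.map (PySem.Str.join " "),
         (List.foldl (MStep m) (MC, Mcur, t) gs).2.2) := by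
  intro gs
  induction gs with
  | nil => intro MC Mcur t _ _; simp
  | cons g gs ih =>
      intro MC Mcur t hgs hcur
      have hg : GoodG g := hgs g (by simp)
      have hgs' : ∀ v ∈ gs, GoodG v := fun v hv => hgs v (by simp [hv])
      have htok : ((PySem.Str.split₀ (PySem.Str.join " " g)).length : Int) = (g.length : Int) := by
        rw [split_join g hg.2]
      simp only [List.map_cons, List.foldl_cons]
      by_cases h : t + (g.length : Int) > m
      · have hst : MStep m (MC, Mcur, t) g
            = ((if Mcur = [] then MC else MC ++ [Mcur.flatten]), [g], (g.length : Int)) := by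
          unfold MStep
          rw [if_pos h]
        have ha : aPackStep m (MC.map (PySem.Str.join " "), Mcur.map (PySem.Str.join " "), t)
              (PySem.Str.join " " g)
            = ((if Mcur = [] then MC else MC ++ [Mcur.flatten]).map (PySem.Str.join " "),
               [g].map (PySem.Str.join " "), (g.length : Int)) := by
          unfold aPackStep
          simp only [htok]
          rw [if_pos h]
          by_cases hmc : Mcur = []
          · simp [hmc]
          · rw [if_neg (by simpa using hmc), if_neg hmc]
            rw [join_map_join Mcur (fun v hv => (hcur v hv).1)]
            simp
        rw [ha, hst]
        exact ih _ [g] _ hgs' (by intro v hv; simp at hv; subst hv; exact hg)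
      · have hst : MStep m (MC, Mcur, t) g = (MC, Mcur ++ [g], t + (g.length : Int)) := by
          unfold MStep
          rw [if_neg h]
        have ha : aPackStep m (MC.map (PySem.Str.join " "), Mcur.map (PySem.Str.join " "), t)
              (PySem.Str.join " " g)
            = (MC.map (PySem.Str.join " "), (Mcur ++ [g]).map (PySem.Str.join " "),
               t + (g.length : Int)) := by
          unfold aPackStep
          simp only [htok]
          rw [if_neg h]
          simp
        rw [ha, hst]
        refine ih _ (Mcur ++ [g]) _ hgs' ?_
        intro v hv
        rcases List.mem_append.mp hv with hv | hv
        · exact hcur v hv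
        · rw [List.mem_singleton.mp hv]; exact hg

-- ===== VERDICT (by name: the statement is the Claim_ definition above) =====
theorem sentence_chunking_spec : Claim_equal_sentence_chunking := by
  intro text m _hdom
  show sentence_chunking text m = sentence_chunking_alt text m
  have hgood := split₀_good text
  have hgs : ∀ g ∈ groupsW (PySem.Str.split₀ text) [], GoodG g := by
    intro g hg
    refine ⟨groups_ne _ _ g hg, ?_⟩
    intro w hw
    have hmem : w ∈ (groupsW (PySem.Str.split₀ text) []).flatten := List.mem_flatten.mpr ⟨g, hg, hw⟩
    rw [groups_flatten] at hmem
    exact hgood w (by simpa using hmem)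
  -- A = common form
  have hA : sentence_chunking text m
      = ((runG m (groupsW (PySem.Str.split₀ text) [])).map List.flatten).map (PySem.Str.join " ") := by
    unfold sentence_chunking
    dsimp only
    rw [show (if ((PySem.Str.split₀ text).foldl aPass1Step ([], [])).2 = []
          then ((PySem.Str.split₀ text).foldl aPass1Step ([], [])).1
          else ((PySem.Str.split₀ text).foldl aPass1Step ([], [])).1
            ++ [PySem.Str.join " " ((PySem.Str.split₀ text).foldl aPass1Step ([], [])).2])
        = (groupsW (PySem.Str.split₀ text) []).map (PySem.Str.join " ") from by
      simpa using pass1_groups (PySem.Str.split₀ text) [] []]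
    have hpack := packA m (groupsW (PySem.Str.split₀ text) []) [] [] 0 hgs (by simp)
    simp only [List.map_nil] at hpack
    rw [hpack]
    have hQgood := M_cur_good m (groupsW (PySem.Str.split₀ text) []) [] [] 0 hgs (by simp)
    rw [show (if (List.foldl (MStep m) ([], [], 0) (groupsW (PySem.Str.split₀ text) [])).2.1.map
              (PySem.Str.join " ") = []
          then (List.foldl (MStep m) ([], [], 0) (groupsW (PySem.Str.split₀ text) [])).1.map
              (PySem.Str.join " ")
          else (List.foldl (MStep m) ([], [], 0) (groupsW (PySem.Str.split₀ text) [])).1.map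
              (PySem.Str.join " ")
            ++ [PySem.Str.join " "
                ((List.foldl (MStep m) ([], [], 0) (groupsW (PySem.Str.split₀ text) [])).2.1.map
                  (PySem.Str.join " "))])
        = (if (List.foldl (MStep m) ([], [], 0) (groupsW (PySem.Str.split₀ text) [])).2.1 = []
          then (List.foldl (MStep m) ([], [], 0) (groupsW (PySem.Str.split₀ text) [])).1
          else (List.foldl (MStep m) ([], [], 0) (groupsW (PySem.Str.split₀ text) [])).1
            ++ [(List.foldl (MStep m) ([], [], 0) (groupsW (PySem.Str.split₀ text) [])).2.1.flatten]).map
            (PySem.Str.join " ") from by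
      by_cases hq : (List.foldl (MStep m) ([], [], 0) (groupsW (PySem.Str.split₀ text) [])).2.1 = []
      · simp [hq]
      · rw [if_neg (by simpa using hq), if_neg hq]
        rw [join_map_join _ (fun v hv => (hQgood v hv).1)]
        simp]
    rw [MRes_run]
  rw [hA]
  -- B = common form
  unfold sentence_chunking_alt
  dsimp only
  rw [enum_cuts (PySem.Str.split₀ text) 0 hgood]
  have hcg := cuts_groups (PySem.Str.split₀ text) 0 [] (by intro v hv; simp at hv)
  simp only [List.length_nil, Nat.cast_zero, sub_zero, zero_add, List.nil_append] at hcg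
  rw [PySem.List.pyGet?_neg_one]
  cases hlast : (PySem.Str.split₀ text).getLast? with
  | none =>
      have hw0 : PySem.Str.split₀ text = [] := List.getLast?_eq_none_iff.mp hlast
      rw [hw0]
      simp [groupsW, runG, rawCuts, bOuter]
  | some w =>
      have hwmem : w ∈ PySem.Str.split₀ text := List.mem_of_getLast? hlast
      have hb : bEnds w = endsP w := bEnds_eq w (hgood w hwmem)
      simp only [hb]
      have hcuts : (if endsP w then rawCuts 0 (PySem.Str.split₀ text)
            else rawCuts 0 (PySem.Str.split₀ text) ++ [((PySem.Str.split₀ text).length : Int)])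
          = cumEnds 0 (groupsW (PySem.Str.split₀ text) []) := by
        rw [hcg]
        cases he : endsP w with
        | true => simp [tailCut, hlast, he]
        | false => simp [tailCut, hlast, he]
      rw [hcuts]
      have hflat : (groupsW (PySem.Str.split₀ text) []).flatten = PySem.Str.split₀ text := by
        simpa using groups_flatten (PySem.Str.split₀ text) []
      have hout := outer_run m (groupsW (PySem.Str.split₀ text) []).length
        (groupsW (PySem.Str.split₀ text) []) [] (le_refl _)
      simp only [List.length_nil, Nat.cast_zero, List.nil_append, hflat] at hout
      rw [hout]
      simp [List.map_map, Function.comp_def]
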